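-- pv_equiv track=rewrite | github.com/Tsuchinotama/LoL_Simulator | Lol_Worlds2020_Simulator.py | group_already_affected
-- ===== SOURCE A (Python) =====
-- def group_already_affected(current_affect) :
--     list_num_group = list(range(4))
--     for affect in current_affect :
--         if not affect[1] in list_num_group :
--             return True
--         else :
--             list_num_group.remove(affect[1])
--     else :
--         return False
-- ===== SOURCE B (Python) =====
-- def group_already_affected(current_affect):
--     indices = [affect[1] for affect in current_affect]
--     if any(i not in range(4) for i in indices):
--         return True
--     return len(indices) != len(set(indices))
-- ===== Notes on version B (the rewrite author's own statement) =====
-- stated objective: simpler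
-- what changed: Replaces A's single-pass shrinking-pool-with-remove loop by a collect-then-aggregate decomposition: gather the group indices, flag any index outside range(4), otherwise detect duplicates by comparing len(indices) with len(set(indices)).
import Mathlib
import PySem

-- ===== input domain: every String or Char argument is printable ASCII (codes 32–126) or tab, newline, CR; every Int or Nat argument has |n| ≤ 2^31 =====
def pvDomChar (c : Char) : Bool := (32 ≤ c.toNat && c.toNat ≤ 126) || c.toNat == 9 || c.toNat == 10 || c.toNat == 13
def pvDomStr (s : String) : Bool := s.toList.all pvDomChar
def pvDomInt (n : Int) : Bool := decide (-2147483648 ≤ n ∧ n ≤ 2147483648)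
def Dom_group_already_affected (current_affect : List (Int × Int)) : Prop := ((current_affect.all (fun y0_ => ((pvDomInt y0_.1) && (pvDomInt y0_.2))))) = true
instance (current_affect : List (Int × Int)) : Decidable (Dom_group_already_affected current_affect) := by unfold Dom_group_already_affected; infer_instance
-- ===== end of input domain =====

-- B replaces A's shrinking-pool loop with a collect-then-aggregate check (objective: simpler).

-- ===== PORT A =====
-- the for-loop of A: state is the shrinking pool `list_num_group`.
-- `list.remove(v)` is PySem.List.remove?; the `.getD pool` default is unreachable,
-- since the else-branch guarantees `a.2 ∈ pool` (Python would raise only if absent).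
def groupAffLoopA : List Int → List (Int × Int) → Bool
  | _, [] => false
  | pool, a :: rest =>
    if !(pool.contains a.2) then true
    else groupAffLoopA ((PySem.List.remove? pool a.2).getD pool) rest

def group_already_affected (current_affect : List (Int × Int)) : Bool :=
  groupAffLoopA (PySem.List.pyRange 0 4 1) current_affect

-- ===== PORT B =====
def group_already_affected_alt (current_affect : List (Int × Int)) : Bool :=
  let indices := current_affect.map (·.2)
  if indices.any (fun i => !((PySem.List.pyRange 0 4 1).contains i)) then true
  else indices.length != (PySem.Set.ofList indices).length

-- ===== PRECONDITION & SPEC =====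
def Spec_group_already_affected (current_affect : List (Int × Int)) (out : Bool) : Prop := out = group_already_affected_alt current_affect
instance (current_affect : List (Int × Int)) (out : Bool) : Decidable (Spec_group_already_affected current_affect out) := by unfold Spec_group_already_affected; infer_instance

-- ===== CLAIM (what is proved, stated in full; the proofs are below) =====
def Claim_equal_group_already_affected : Prop := ∀ (current_affect : List (Int × Int)), Dom_group_already_affected current_affect → Spec_group_already_affected current_affect (group_already_affected current_affect)

-- ===== LEMMAS AND PROOFS =====

-- A's loop, characterised: with a duplicate-free pool it returns false exactly when the
-- indices are pairwise distinct and all lie in the pool.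
theorem groupAffLoopA_char (xs : List (Int × Int)) : ∀ (pool : List Int), pool.Nodup →
    groupAffLoopA pool xs
      = !decide ((xs.map (·.2)).Nodup ∧ ∀ i ∈ xs.map (·.2), i ∈ pool) := by
  induction xs with
  | nil => intro pool _; simp [groupAffLoopA]
  | cons a rest ih =>
    intro pool hnd
    by_cases hmem : a.2 ∈ pool
    · have hrem : (PySem.List.remove? pool a.2).getD pool = pool.erase a.2 := by
        rw [PySem.List.remove?_eq_some_erase pool a.2 hmem]; rfl
      rw [groupAffLoopA, if_neg (by simp [hmem]), hrem,
        ih (pool.erase a.2) (hnd.erase a.2)]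
      have heq : ((rest.map (·.2)).Nodup ∧ ∀ i ∈ rest.map (·.2), i ∈ pool.erase a.2)
          ↔ (((a :: rest).map (·.2)).Nodup ∧ ∀ i ∈ (a :: rest).map (·.2), i ∈ pool) := by
        simp only [List.map_cons, List.nodup_cons, List.mem_cons]
        constructor
        · rintro ⟨hnd', hsub⟩
          refine ⟨⟨fun hin => ?_, hnd'⟩, ?_⟩
          · exact ((List.Nodup.mem_erase_iff hnd).mp (hsub _ hin)).1 rfl
          · rintro i (rfl | hi)
            · exact hmem
            · exact ((List.Nodup.mem_erase_iff hnd).mp (hsub _ hi)).2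
        · rintro ⟨⟨hna, hnd'⟩, hsub⟩
          refine ⟨hnd', fun i hi => ?_⟩
          exact (List.Nodup.mem_erase_iff hnd).mpr
            ⟨fun h => hna (h ▸ hi), hsub i (Or.inr hi)⟩
      rw [decide_eq_decide.mpr heq]
    · rw [groupAffLoopA, if_pos (by simp [hmem])]
      have hno : ¬(((a :: rest).map (·.2)).Nodup ∧ ∀ i ∈ (a :: rest).map (·.2), i ∈ pool) := by
        rintro ⟨_, hsub⟩; exact hmem (hsub a.2 (by simp))
      rw [decide_eq_false hno]; rfl

-- set accumulation: the folded set grows to full length exactly when the added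
-- elements are pairwise distinct and disjoint from the accumulator.
theorem foldl_add_length_le {α : Type} [DecidableEq α] (l : List α) : ∀ (acc : List α),
    (l.foldl PySem.Set.add acc).length ≤ acc.length + l.length := by
  induction l with
  | nil => intro acc; simp
  | cons a l ih =>
    intro acc
    simp only [List.foldl_cons]
    calc (l.foldl PySem.Set.add (PySem.Set.add acc a)).length
        ≤ (PySem.Set.add acc a).length + l.length := ih _
      _ ≤ acc.length + (a :: l).length := by
          unfold PySem.Set.add; split <;> simp [List.length_append] <;> omega

theorem foldl_add_length_eq_iff {α : Type} [DecidableEq α] (l : List α) : ∀ (acc : List α),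
    (l.foldl PySem.Set.add acc).length = acc.length + l.length
      ↔ (l.Nodup ∧ ∀ x ∈ l, x ∉ acc) := by
  induction l with
  | nil => intro acc; simp
  | cons a l ih =>
    intro acc
    simp only [List.foldl_cons]
    by_cases hmem : a ∈ acc
    · have hadd : PySem.Set.add acc a = acc := by
        unfold PySem.Set.add; simp [hmem]
      rw [hadd]
      constructor
      · intro h
        have := foldl_add_length_le l acc
        simp [List.length_cons] at h; omega
      · rintro ⟨_, hdisj⟩
        exact absurd hmem (hdisj a (by simp))
    · have hadd : PySem.Set.add acc a = acc ++ [a] := by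
        unfold PySem.Set.add; simp [hmem]
      rw [hadd,
        show acc.length + (a :: l).length = (acc ++ [a]).length + l.length by
          simp [List.length_append]; omega,
        ih (acc ++ [a])]
      simp only [List.nodup_cons, List.mem_cons, List.mem_append]
      constructor
      · rintro ⟨hnd, hdisj⟩
        refine ⟨⟨fun hal => hdisj a hal (Or.inr (Or.inl rfl)), hnd⟩, ?_⟩
        rintro x (rfl | hx)
        · exact hmem
        · exact fun hxacc => hdisj x hx (Or.inl hxacc)
      · rintro ⟨⟨hal, hnd⟩, hdisj⟩
        refine ⟨hnd, fun x hx h => ?_⟩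
        rcases h with hxacc | rfl | h
        · exact hdisj x (Or.inr hx) hxacc
        · exact hal hx
        · exact absurd h (List.not_mem_nil)

-- set(xs) has as many elements as xs exactly when xs has no duplicates.
theorem length_ofList_eq_iff {α : Type} [DecidableEq α] (l : List α) :
    (PySem.Set.ofList l).length = l.length ↔ l.Nodup := by
  unfold PySem.Set.ofList PySem.Set.empty
  rw [show l.length = ([] : List α).length + l.length by simp,
    foldl_add_length_eq_iff]
  simp

theorem group_already_affected_spec' (current_affect : List (Int × Int)) :
    group_already_affected current_affect = group_already_affected_alt current_affect := by
  rw [group_already_affected,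
    groupAffLoopA_char _ _ (PySem.List.nodup_pyRange_one 0 4)]
  simp only [group_already_affected_alt]
  generalize current_affect.map (·.2) = indices
  by_cases hall : ∀ i ∈ indices, i ∈ PySem.List.pyRange 0 4 1
  · have hany : (indices.any fun i => !((PySem.List.pyRange 0 4 1).contains i)) = false := by
      rw [List.any_eq_false]
      intro i hi2
      simpa using hall i hi2
    rw [hany, if_neg (by simp)]
    by_cases hnd : indices.Nodup
    · have hlen : (PySem.Set.ofList indices).length = indices.length :=
        (length_ofList_eq_iff indices).mpr hnd
      simp [hnd, hlen]
      intro i hi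
      simpa using hall i hi
    · have hlen : (PySem.Set.ofList indices).length ≠ indices.length := by
        intro h; exact hnd ((length_ofList_eq_iff indices).mp h)
      have hbne : (indices.length != (PySem.Set.ofList indices).length) = true := by
        simp only [bne_iff_ne, ne_eq]
        omega
      simp [hnd, hbne]
  · have hno : ¬(indices.Nodup ∧ ∀ i ∈ indices, i ∈ PySem.List.pyRange 0 4 1) :=
      fun h => hall h.2
    have hany : (indices.any fun i => !((PySem.List.pyRange 0 4 1).contains i)) = true := by
      rw [List.any_eq_true]
      push Not at hall
      obtain ⟨i, h1, h2⟩ := hall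
      exact ⟨i, h1, by simp [h2]⟩
    rw [hany, if_pos rfl, decide_eq_false hno]
    rfl

-- ===== VERDICT (by name: the statement is the Claim_ definition above) =====
theorem group_already_affected_spec : Claim_equal_group_already_affected := by
  intro xs _
  exact group_already_affected_spec' xs
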